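-- pv_equiv track=rewrite | github.com/ricardofrantz/minuit2-rs | scripts/generate_executed_surface_mapping.py | extract_function_prefix
-- ===== SOURCE A (Python) =====
-- def extract_function_prefix(demangled: str) -> str:
--     text = demangled.strip()
--     if not text:
--         return text
--
--     # Find the argument list by matching the final parenthesized segment from the right.
--     close_idx = text.rfind(")")
--     if close_idx == -1:
--         return text
--
--     depth = 0
--     open_idx = -1
--     for i in range(close_idx, -1, -1):
--         ch = text[i]
--         if ch == ")":
--             depth += 1
--         elif ch == "(":
--             depth -= 1
--             if depth == 0:
--                 open_idx = i
--                 break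
--
--     if open_idx == -1:
--         return text
--     return text[:open_idx].strip()
-- ===== SOURCE B (Python) =====
-- def extract_function_prefix(demangled: str) -> str:
--     text = demangled.strip()
--     if not text:
--         return text
--
--     close_idx = text.rfind(")")
--     if close_idx == -1:
--         return text
--
--     # Forward scan: stack of indices of currently-unmatched '(' characters.
--     # After consuming text[:close_idx], the stack top is the '(' matching the
--     # final ')'.
--     stack = []
--     for i, ch in enumerate(text[:close_idx]):
--         if ch == "(":
--             stack.append(i)
--         elif ch == ")" and stack:
--             stack.pop()
--
--     if not stack:
--         return text
--     return text[:stack[-1]].strip()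
-- ===== Notes on version B (the rewrite author's own statement) =====
-- stated objective: alternative
-- what changed: A matches the final ')' by a backward depth-counting scan from the right; B does a single forward scan maintaining a stack of indices of unmatched '(' and reads the match off the stack top.
import Mathlib
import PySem

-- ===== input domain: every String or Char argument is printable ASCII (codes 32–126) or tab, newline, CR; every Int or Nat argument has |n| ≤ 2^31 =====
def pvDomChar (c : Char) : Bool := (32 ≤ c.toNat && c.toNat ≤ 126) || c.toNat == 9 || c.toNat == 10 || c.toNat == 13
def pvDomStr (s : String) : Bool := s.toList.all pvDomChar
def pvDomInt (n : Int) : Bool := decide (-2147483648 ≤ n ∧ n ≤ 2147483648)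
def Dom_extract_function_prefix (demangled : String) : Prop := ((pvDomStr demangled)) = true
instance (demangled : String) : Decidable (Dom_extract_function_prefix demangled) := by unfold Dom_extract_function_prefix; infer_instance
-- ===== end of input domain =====

-- B replaces A's backward depth-counting scan by a forward stack-of-indices scan; alternative decomposition, same cost.

-- ===== PORT A =====
-- A's for-loop 'for i in range(close_idx, -1, -1)' with break, transliterated as a
-- countdown recursion on i; i is always a valid index here (i ≤ close_idx < len),
-- so the in-range read text[i] is ported as getD.
def pvLoopA (cs : List Char) : Nat → Int → Int
  | i, depth =>
    let ch := cs.getD i ' '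
    if ch = ')' then
      match i with
      | 0 => -1
      | j + 1 => pvLoopA cs j (depth + 1)
    else if ch = '(' then
      if depth - 1 = 0 then (i : Int)
      else
        match i with
        | 0 => -1
        | j + 1 => pvLoopA cs j (depth - 1)
    else
      match i with
      | 0 => -1
      | j + 1 => pvLoopA cs j depth
  termination_by i _ => i

def extract_function_prefix (demangled : String) : String :=
  let text := PySem.Str.strip demangled
  if text = "" then text
  else
    let close_idx := PySem.Str.rfind text ")"
    if close_idx = -1 then text
    else
      let open_idx := pvLoopA text.toList close_idx.toNat 0
      if open_idx = -1 then text
      else PySem.Str.strip (PySem.Str.slice text none (some open_idx))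

-- ===== PORT B =====
-- Source B's forward loop over enumerate(text[:close_idx]); the stack is kept with its
-- top at the head (Python appends at the end and reads stack[-1]); Python's guarded
-- 'elif ch == ")" and stack: stack.pop()' is List.tail (tail [] = []).
def pvLoopB : List (Int × Char) → List Int → List Int
  | [], stack => stack
  | (i, ch) :: rest, stack =>
    pvLoopB rest (if ch = '(' then i :: stack else if ch = ')' then stack.tail else stack)

def extract_function_prefix_alt (demangled : String) : String :=
  let text := PySem.Str.strip demangled
  if text = "" then text
  else
    let close_idx := PySem.Str.rfind text ")"
    if close_idx = -1 then text
    else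
      let stack := pvLoopB (PySem.List.enumerate (PySem.Str.slice text none (some close_idx)).toList 0) []
      match stack with
      | [] => text
      | top :: _ => PySem.Str.strip (PySem.Str.slice text none (some top))

-- ===== PRECONDITION & SPEC =====
def Spec_extract_function_prefix (demangled : String) (out : String) : Prop := out = extract_function_prefix_alt demangled
instance (demangled : String) (out : String) : Decidable (Spec_extract_function_prefix demangled out) := by unfold Spec_extract_function_prefix; infer_instance

-- ===== CLAIM (what is proved, stated in full; the proofs are below) =====
def Claim_equal_extract_function_prefix : Prop := ∀ (demangled : String), Dom_extract_function_prefix demangled → Spec_extract_function_prefix demangled (extract_function_prefix demangled)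

-- ===== LEMMAS AND PROOFS =====

-- The stack built by B over the first n characters.
def pvStack (cs : List Char) (n : Nat) : List Int :=
  pvLoopB (PySem.List.enumerate (cs.take n) 0) []

theorem pvLoopB_append (xs ys : List (Int × Char)) (st : List Int) :
    pvLoopB (xs ++ ys) st = pvLoopB ys (pvLoopB xs st) := by
  induction xs generalizing st with
  | nil => rfl
  | cons p rest ih =>
    obtain ⟨i, ch⟩ := p
    simp [pvLoopB, ih]

theorem pvLoopB_nonneg (xs : List (Int × Char)) (st : List Int)
    (hxs : ∀ p ∈ xs, 0 ≤ p.1) (hst : ∀ x ∈ st, 0 ≤ x) :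
    ∀ x ∈ pvLoopB xs st, 0 ≤ x := by
  induction xs generalizing st with
  | nil => simpa [pvLoopB] using hst
  | cons p rest ih =>
    obtain ⟨i, ch⟩ := p
    refine ih _ (fun q hq => hxs q (List.mem_cons_of_mem _ hq)) ?_
    split_ifs with h1 h2
    · intro x hx
      rcases List.mem_cons.mp hx with h | h
      · exact h ▸ hxs (i, ch) (by simp)
      · exact hst x h
    · exact fun x hx => hst x (List.mem_of_mem_tail hx)
    · exact hst

theorem pvStack_nonneg (cs : List Char) (n : Nat) : ∀ x ∈ pvStack cs n, 0 ≤ x := by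
  refine pvLoopB_nonneg _ _ ?_ (by simp)
  intro p hp
  rcases (PySem.List.mem_enumerate_iff _ _ _).mp hp with ⟨k, hk, rfl⟩
  simp

-- Key correspondence: A's backward depth-d+1 scan from i equals the d-th entry of
-- B's stack after the first i+1 characters.
theorem pvKey (cs : List Char) :
    ∀ (i d : Nat), i < cs.length →
      pvLoopA cs i ((d : Int) + 1) = ((pvStack cs (i + 1))[d]?).getD (-1) := by
  intro i
  induction i with
  | zero =>
    intro d h0
    obtain ⟨c, t, rfl⟩ : ∃ c t, cs = c :: t := by
      cases cs with
      | nil => simp at h0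
      | cons c t => exact ⟨c, t, rfl⟩
    rw [pvLoopA]
    have hgd : (c :: t).getD 0 ' ' = c := rfl
    by_cases hc1 : c = ')'
    · cases d <;> simp [hgd, hc1, pvStack, PySem.List.enumerate, pvLoopB]
    · by_cases hc2 : c = '('
      · cases d with
        | zero => simp [hgd, hc1, hc2, pvStack, PySem.List.enumerate, pvLoopB]
        | succ e =>
          rw [hgd, hc2, if_neg (by decide : ¬ ('(' = ')')), if_pos rfl,
            if_neg (by push_cast; omega : ¬ (((e + 1 : Nat) : Int) + 1 - 1 = 0))]
          simp [pvStack, PySem.List.enumerate, pvLoopB, hc2]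
      · cases d <;> simp [hgd, hc1, hc2, pvStack, PySem.List.enumerate, pvLoopB]
  | succ j ih =>
    intro d hlt
    have hj : j < cs.length := Nat.lt_of_succ_lt hlt
    have hget : cs.getD (j + 1) ' ' = cs[j + 1] := by
      simp [List.getD, List.getElem?_eq_getElem hlt]
    have htake : cs.take (j + 2) = cs.take (j + 1) ++ [cs[j + 1]] := by
      simpa using (List.take_succ (l := cs) (n := j + 1)).trans (by simp [hlt])
    have hlen : (cs.take (j + 1)).length = j + 1 := by simp [Nat.le_of_lt hlt]
    have hstack : pvStack cs (j + 2) =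
        pvLoopB [((j + 1 : Int), cs[j + 1])] (pvStack cs (j + 1)) := by
      unfold pvStack
      rw [htake, PySem.List.enumerate_append, pvLoopB_append, hlen]
      norm_num [PySem.List.enumerate]
    rw [pvLoopA, hget]
    by_cases hc1 : cs[j + 1] = ')'
    · rw [if_pos hc1]
      have harg : (d : Int) + 1 + 1 = ((d + 1 : Nat) : Int) + 1 := by push_cast; ring
      show pvLoopA cs j ((d : Int) + 1 + 1) = _
      rw [harg, ih (d + 1) hj, hstack]
      simp [pvLoopB, hc1, List.getElem?_tail]
    · by_cases hc2 : cs[j + 1] = '('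
      · rw [if_neg hc1, if_pos hc2]
        cases d with
        | zero =>
          rw [if_pos (by norm_num)]
          rw [hstack]
          simp [pvLoopB, hc2, hc1]
        | succ e =>
          rw [if_neg (by push_cast; omega : ¬ (((e + 1 : Nat) : Int) + 1 - 1 = 0))]
          have harg : ((e + 1 : Nat) : Int) + 1 - 1 = ((e : Nat) : Int) + 1 := by
            push_cast; ring
          show pvLoopA cs j _ = _
          rw [harg, ih e hj, hstack]
          simp [pvLoopB, hc2, hc1]
      · rw [if_neg hc1, if_neg hc2]
        show pvLoopA cs j ((d : Int) + 1) = _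
        rw [ih d hj, hstack]
        simp [pvLoopB, hc2, hc1]

-- rfind spec: a non-(-1) result is nonnegative and points at an occurrence.
theorem pvRfindGo_spec (s sub : List Char) :
    ∀ k, PySem.Chars.rfind.go s sub k ≠ -1 →
      0 ≤ PySem.Chars.rfind.go s sub k ∧
        sub <+: s.drop (PySem.Chars.rfind.go s sub k).toNat := by
  intro k
  induction k with
  | zero =>
    intro h
    by_cases hp : sub.isPrefixOf s
    · simp only [PySem.Chars.rfind.go, hp, if_true]
      exact ⟨le_refl 0, by simpa using List.isPrefixOf_iff_prefix.mp hp⟩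
    · simp [PySem.Chars.rfind.go, hp] at h
  | succ j ih =>
    intro h
    by_cases hp : sub.isPrefixOf (s.drop (j + 1))
    · simp only [PySem.Chars.rfind.go, hp, if_true]
      exact ⟨by positivity, by simpa using List.isPrefixOf_iff_prefix.mp hp⟩
    · have hgo : PySem.Chars.rfind.go s sub (j + 1) = PySem.Chars.rfind.go s sub j := by
        simp [PySem.Chars.rfind.go, hp]
      rw [hgo] at h ⊢
      exact ih h
  termination_by k => k

theorem pvRfind_spec (s sub : List Char) (h : PySem.Chars.rfind s sub ≠ -1) :
    0 ≤ PySem.Chars.rfind s sub ∧ sub <+: s.drop (PySem.Chars.rfind s sub).toNat := by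
  unfold PySem.Chars.rfind
  exact pvRfindGo_spec s sub s.length (by simpa [PySem.Chars.rfind] using h)

-- A's backward loop started at position r (whose character is the final ')'):
-- one step turns depth 0 into 1 and the correspondence pvKey takes over.
theorem pvLoopA_start (cs : List Char) (r : Nat) (hlt : r < cs.length)
    (h : cs.getD r ' ' = ')') :
    pvLoopA cs r 0 = ((pvStack cs r)[0]?).getD (-1) := by
  cases r with
  | zero =>
    rw [pvLoopA.eq_def]
    simp [h, pvStack, PySem.List.enumerate, pvLoopB]
  | succ j =>
    rw [pvLoopA.eq_def]
    simp only [h, if_pos rfl]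
    have hk := pvKey cs j 0 (by omega)
    norm_num at hk ⊢
    exact hk

-- ===== VERDICT (by name: the statement is the Claim_ definition above) =====
theorem extract_function_prefix_spec : Claim_equal_extract_function_prefix := by
  intro demangled _
  unfold Spec_extract_function_prefix extract_function_prefix extract_function_prefix_alt
  set text := PySem.Str.strip demangled with htext
  by_cases hempty : text = ""
  · simp [hempty]
  · simp only [hempty, if_false]
    by_cases hclose : PySem.Str.rfind text ")" = -1
    · have hcloseC : PySem.Chars.rfind text.toList [')'] = -1 := by simpa using hclose
      simp [hcloseC]
    · simp only [hclose, if_false]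
      obtain ⟨hnn, hpre⟩ := pvRfind_spec text.toList [')']
        (by simpa using hclose)
      obtain ⟨r, hrcast⟩ : ∃ r : Nat, PySem.Str.rfind text ")" = (r : Int) :=
        ⟨(PySem.Str.rfind text ")").toNat, by
          rw [Int.toNat_of_nonneg (by simpa using hnn)]⟩
      have hrc' : PySem.Chars.rfind text.toList [')'] = (r : Int) := by
        simpa using hrcast
      rw [hrc', Int.toNat_natCast] at hpre
      have hchar : text.toList[r]? = some ')' := by
        rcases hpre with ⟨t, ht⟩
        have h0 : (text.toList.drop r)[0]? = some ')' := by rw [← ht]; simp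
        simpa using h0
      have hrlt : r < text.toList.length := by
        by_contra hge
        rw [List.getElem?_eq_none (by omega)] at hchar
        simp at hchar
      have hgd : text.toList.getD r ' ' = ')' := by
        simp [List.getD, hchar]
      have hslice : (PySem.Str.slice text none (some ((r : Nat) : Int))).toList
          = text.toList.take r := by
        simp [PySem.List.slice_to_natCast]
      rw [hrcast, Int.toNat_natCast,
        pvLoopA_start text.toList r hrlt hgd]
      cases hst : pvStack text.toList r with
      | nil =>
        simp only [pvStack] at hst
        simp [hst, hslice]
      | cons top rest =>
        have htopnn : 0 ≤ top := pvStack_nonneg _ r top (by rw [hst]; simp)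
        simp only [pvStack] at hst
        simp only [hslice, hst]
        rw [if_neg (by simp; omega)]
        simp
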